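-- pv_equiv track=rewrite | github.com/ArrogantL/nlp | Lab3/v1/ME_v1.py | getWordShape
-- ===== SOURCE A (Python) =====
-- def getWordShape(word, isAbbr=False):
--     wordshape = "Shape"
--     for i in word:
--         if i.isupper():
--             wordshape += 'X'
--         elif i.islower():
--             wordshape += 'x'
--         elif i.isdigit():
--             wordshape += 'd'
--         else:
--             wordshape += '-'
--         if isAbbr and wordshape[-1] == wordshape[-2]:
--             wordshape = wordshape[0:-1]
--
--     return wordshape
-- ===== SOURCE B (Python) =====
-- def getWordShape(word, isAbbr=False):
--     shape = lambda c: 'X' if c.isupper() else 'x' if c.islower() else 'd' if c.isdigit() else '-'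
--     chars = [shape(c) for c in word]
--     if isAbbr:
--         collapsed = []
--         for c in chars:
--             if not collapsed or c != collapsed[-1]:
--                 collapsed.append(c)
--         chars = collapsed
--     return 'Shape' + ''.join(chars)
-- ===== Notes on version B (the rewrite author's own statement) =====
-- stated objective: simpler
-- what changed: Replaces A's fused single-pass append-then-trim on a growing string by a two-pass decomposition: classify every character to its shape char, then (only if isAbbr) collapse consecutive duplicate runs, and prepend the fixed prefix once at the end.
import Mathlib
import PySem

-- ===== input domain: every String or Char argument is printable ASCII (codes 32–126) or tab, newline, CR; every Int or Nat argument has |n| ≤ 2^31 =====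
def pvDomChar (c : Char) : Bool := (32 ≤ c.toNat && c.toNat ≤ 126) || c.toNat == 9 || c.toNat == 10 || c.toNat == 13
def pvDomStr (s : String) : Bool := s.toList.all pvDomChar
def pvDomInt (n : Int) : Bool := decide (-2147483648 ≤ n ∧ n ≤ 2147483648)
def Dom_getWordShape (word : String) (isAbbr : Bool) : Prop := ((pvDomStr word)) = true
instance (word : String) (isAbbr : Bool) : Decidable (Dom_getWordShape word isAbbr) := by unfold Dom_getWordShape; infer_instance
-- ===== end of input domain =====

-- B re-decomposes A's fused append-then-trim loop into classify-all then collapse-runs; objective: simpler, same cost.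

-- ===== PORT A =====
-- the loop body of A: append the shape char; if isAbbr and the last two chars are
-- equal (wordshape[-1] == wordshape[-2]), trim the last one (wordshape[0:-1])
def pvStepA (isAbbr : Bool) (ws : List Char) (i : Char) : List Char :=
  let ws := ws ++
    (if PySem.Chars.isupper i then ['X']
     else if PySem.Chars.islower i then ['x']
     else if PySem.Chars.isdigit i then ['d']
     else ['-'])
  if isAbbr && (PySem.List.pyGet? ws (-1) == PySem.List.pyGet? ws (-2)) then
    PySem.List.slice ws (some 0) (some (-1))
  else ws

def getWordShape (word : String) (isAbbr : Bool) : String :=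
  String.mk <| word.toList.foldl (pvStepA isAbbr) "Shape".toList

-- ===== PORT B =====
-- shape of one character
def pvShape (c : Char) : Char :=
  if PySem.Chars.isupper c then 'X'
  else if PySem.Chars.islower c then 'x'
  else if PySem.Chars.isdigit c then 'd'
  else '-'

-- B's run-collapsing loop body: append c unless it repeats the current last char
def pvStepB (collapsed : List Char) (c : Char) : List Char :=
  if collapsed.isEmpty || (PySem.List.pyGet? collapsed (-1) != some c) then
    collapsed ++ [c]
  else collapsed

def getWordShape_alt (word : String) (isAbbr : Bool) : String :=
  String.mk ("Shape".toList ++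
    (if isAbbr then (word.toList.map pvShape).foldl pvStepB []
     else word.toList.map pvShape))

-- ===== PRECONDITION & SPEC =====
def Spec_getWordShape (word : String) (isAbbr : Bool) (out : String) : Prop := out = getWordShape_alt word isAbbr
instance (word : String) (isAbbr : Bool) (out : String) : Decidable (Spec_getWordShape word isAbbr out) := by unfold Spec_getWordShape; infer_instance

-- ===== CLAIM (what is proved, stated in full; the proofs are below) =====
def Claim_equal_getWordShape : Prop := ∀ (word : String) (isAbbr : Bool), Dom_getWordShape word isAbbr → Spec_getWordShape word isAbbr (getWordShape word isAbbr)

-- ===== LEMMAS AND PROOFS =====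

-- the four-way classification in A's loop body produces exactly [pvShape c]
theorem pvShapeList (c : Char) :
    (if PySem.Chars.isupper c then ['X']
     else if PySem.Chars.islower c then ['x']
     else if PySem.Chars.isdigit c then ['d']
     else ['-']) = [pvShape c] := by
  unfold pvShape; split_ifs <;> rfl

theorem pvShape_ne_e (c : Char) : pvShape c ≠ 'e' := by
  unfold pvShape; split_ifs <;> decide

-- xs[-2] of l ++ [x] is the last element of l (l nonempty)
theorem pvGet_neg_two (l : List Char) (x : Char) (h : l ≠ []) :
    PySem.List.pyGet? (l ++ [x]) (-2) = l.getLast? := by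
  have hl : 1 ≤ l.length := List.length_pos_iff.mpr h
  have h5 := PySem.List.pyGet?_neg_natCast (xs := l ++ [x]) (k := 2) (by norm_num) (by simp; omega)
  norm_num at h5
  rw [h5, List.getLast?_eq_getElem?]
  rw [List.getElem_append_left (by omega)]
  rw [List.getElem?_eq_getElem (by omega)]
  congr 1

-- without isAbbr, A's loop just appends the shape chars
theorem pvA_false (cs : List Char) (acc : List Char) :
    cs.foldl (pvStepA false) acc = acc ++ cs.map pvShape := by
  induction cs generalizing acc with
  | nil => simp
  | cons c t ih =>
    have hstep : pvStepA false acc c = acc ++ [pvShape c] := by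
      unfold pvStepA; rw [pvShapeList]; simp
    rw [List.foldl_cons, hstep, ih, List.map_cons, List.append_assoc]; rfl

-- with isAbbr, A's loop started at p ++ b (p ending in 'e', never a shape char)
-- tracks B's collapse loop started at b
theorem pvA_true (cs : List Char) (p b : List Char) (hp : p.getLast? = some 'e') :
    cs.foldl (pvStepA true) (p ++ b) = p ++ (cs.map pvShape).foldl pvStepB b := by
  induction cs generalizing b with
  | nil => simp
  | cons c t ih =>
    have hpne : p ≠ [] := by intro h; rw [h] at hp; simp at hp
    rw [List.foldl_cons, List.map_cons, List.foldl_cons]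
    have hA : pvStepA true (p ++ b) c =
        (if some (pvShape c) = (p ++ b).getLast? then p ++ b
         else (p ++ b) ++ [pvShape c]) := by
      unfold pvStepA
      rw [pvShapeList]
      simp only [Bool.true_and]
      rw [PySem.List.pyGet?_neg_one, List.getLast?_concat,
          pvGet_neg_two _ _ (by simp [hpne])]
      simp only [beq_iff_eq]
      split_ifs with h
      · rw [PySem.List.slice_zero_start, PySem.List.slice_to_neg_one,
            List.dropLast_concat]
      · rfl
    rw [hA]
    cases b with
    | nil =>
      rw [if_neg (by
        rw [List.append_nil, hp]
        simpa using pvShape_ne_e c)]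
      have hB : pvStepB [] (pvShape c) = [pvShape c] := by unfold pvStepB; simp
      rw [hB, List.append_nil]
      exact ih [pvShape c]
    | cons b0 bt =>
      have hlast : (p ++ b0 :: bt).getLast? = (b0 :: bt).getLast? :=
        List.getLast?_append_of_ne_nil _ (by simp)
      have hB0 : PySem.List.pyGet? (b0 :: bt) (-1) = (b0 :: bt).getLast? :=
        PySem.List.pyGet?_neg_one _
      by_cases hc : (b0 :: bt).getLast? = some (pvShape c)
      · rw [if_pos (by rw [hlast, hc])]
        have hB : pvStepB (b0 :: bt) (pvShape c) = b0 :: bt := by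
          unfold pvStepB
          rw [if_neg (by simp [hB0, hc])]
        rw [hB, ih]
      · rw [if_neg (by rw [hlast]; exact fun h => hc h.symm)]
        have hB : pvStepB (b0 :: bt) (pvShape c) = (b0 :: bt) ++ [pvShape c] := by
          unfold pvStepB
          rw [if_pos (by simp [hB0, hc])]
        rw [hB, List.append_assoc, ih]

-- ===== VERDICT (by name: the statement is the Claim_ definition above) =====
theorem getWordShape_spec : Claim_equal_getWordShape := by
  intro word isAbbr _
  unfold Spec_getWordShape getWordShape getWordShape_alt
  cases isAbbr with
  | false =>
    rw [if_neg (by decide), pvA_false]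
  | true =>
    rw [if_pos rfl]
    exact congrArg String.mk (by simpa using pvA_true word.toList "Shape".toList [] (by decide))
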